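-- pv_equiv track=rewrite | github.com/adonSh/adventofcode | 2022/14/day14.py | populate
-- ===== SOURCE A (Python) =====
-- def populate(lines):
--     grid = []
--     xs = [p[0] for p in lines]
--     ys = [p[1] for p in lines]
--
--     for row in range(0, max(ys) + 1):
--         grid.append([])
-- #       for col in range(min(xs), max(xs) + 1):
--         for col in range(0, 2 * max(xs) + 1):
--             if row == 0 and col == 500:
--                 grid[row].append('+')
--             elif (col, row) in lines:
--                 grid[row].append('#')
--             else:
--                 grid[row].append('.')
--
--     return grid
-- ===== SOURCE B (Python) =====
-- def populate(lines):
--     max_x = max(p[0] for p in lines)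
--     max_y = max(p[1] for p in lines)
--     nrows = max_y + 1
--     ncols = 2 * max_x + 1
--     grid = [['.'] * ncols for _ in range(nrows)]
--     for x, y in lines:
--         if 0 <= x < ncols and 0 <= y < nrows:
--             grid[y][x] = '#'
--     if nrows > 0 and 500 < ncols:
--         grid[0][500] = '+'
--     return grid
-- ===== Notes on version B (the rewrite author's own statement) =====
-- stated objective: faster
-- what changed: Replaced A's cell-by-cell scan that tests (col,row) membership in lines for every grid cell with an init-then-scatter pass: build an all-'.' grid once, set '#' at each in-range point, then place '+' last.
import Mathlib
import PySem

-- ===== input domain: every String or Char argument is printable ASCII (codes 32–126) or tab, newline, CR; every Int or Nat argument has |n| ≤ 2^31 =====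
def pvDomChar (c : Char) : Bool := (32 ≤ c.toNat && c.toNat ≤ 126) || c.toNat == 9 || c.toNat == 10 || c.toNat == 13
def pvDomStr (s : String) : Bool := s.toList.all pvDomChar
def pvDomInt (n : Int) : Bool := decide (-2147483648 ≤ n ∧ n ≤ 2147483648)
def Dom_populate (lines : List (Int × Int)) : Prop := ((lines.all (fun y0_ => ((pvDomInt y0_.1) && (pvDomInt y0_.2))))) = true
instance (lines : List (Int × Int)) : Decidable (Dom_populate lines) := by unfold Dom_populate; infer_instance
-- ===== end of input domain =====

-- B replaces A's per-cell membership scan over lines with an init-then-scatter pass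
-- (build an all-'.' grid, mark each in-range point '#', place '+' last): faster when
-- the grid is large relative to the number of points.

-- ===== PORT A =====
def populate (lines : List (Int × Int)) : List (List String) :=
  let xs := lines.map (fun p => p.1)
  let ys := lines.map (fun p => p.2)
  let mx := (PySem.List.max? xs (fun v => v)).getD 0
  let my := (PySem.List.max? ys (fun v => v)).getD 0
  (PySem.List.pyRange 0 (my + 1) 1).map (fun row =>
    (PySem.List.pyRange 0 (2 * mx + 1) 1).map (fun col =>
      if row = 0 ∧ col = 500 then "+"
      else if (col, row) ∈ lines then "#"
      else "."))

-- ===== PORT B =====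
-- grid[y][x] = v  (out-of-range indices leave the grid unchanged; B only uses in-range ones)
def setCell (g : List (List String)) (y x : Nat) (v : String) : List (List String) :=
  g.modify y (fun row => row.set x v)

def populate_alt (lines : List (Int × Int)) : List (List String) :=
  let mx := (PySem.List.max? (lines.map (fun p => p.1)) (fun v => v)).getD 0
  let my := (PySem.List.max? (lines.map (fun p => p.2)) (fun v => v)).getD 0
  let nrows := my + 1
  let ncols := 2 * mx + 1
  let base := List.replicate nrows.toNat (List.replicate ncols.toNat ".")
  let g := lines.foldl (fun (g : List (List String)) (p : Int × Int) =>
    if 0 ≤ p.1 ∧ p.1 < ncols ∧ 0 ≤ p.2 ∧ p.2 < nrows then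
      setCell g p.2.toNat p.1.toNat "#"
    else g) base
  if 0 < nrows ∧ (500 : Int) < ncols then setCell g 0 500 "+" else g

-- ===== PRECONDITION & SPEC =====
-- Pre_ excludes only the empty list, on which Python's max(...) raises ValueError.
def Pre_populate (lines : List (Int × Int)) : Prop := lines ≠ []
instance (lines : List (Int × Int)) : Decidable (Pre_populate lines) := by unfold Pre_populate; infer_instance
def pvWitness_populate : (List (Int × Int)) := [(1, 1), (0, 2)]

def Spec_populate (lines : List (Int × Int)) (out : List (List String)) : Prop := out = populate_alt lines
instance (lines : List (Int × Int)) (out : List (List String)) : Decidable (Spec_populate lines out) := by unfold Spec_populate; infer_instance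

-- ===== CLAIM (what is proved, stated in full; the proofs are below) =====
def Claim_equal_populate : Prop := ∀ (lines : List (Int × Int)), Dom_populate lines → Pre_populate lines → Spec_populate lines (populate lines)

-- ===== LEMMAS AND PROOFS =====

-- total cell read: grid[i][j] with '.' default
def pvGet2 (g : List (List String)) (i j : Nat) : String := (g.getD i []).getD j "."

theorem length_setCell (g : List (List String)) (y x : Nat) (v : String) :
    (setCell g y x v).length = g.length := by
  simp [setCell]

theorem rowlen_setCell (g : List (List String)) (y x : Nat) (v : String) (C : Nat)
    (h : ∀ r ∈ g, r.length = C) : ∀ r ∈ setCell g y x v, r.length = C := by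
  intro r hr
  rcases List.mem_iff_getElem?.1 hr with ⟨k, hk⟩
  unfold setCell at hk
  rw [List.getElem?_modify] at hk
  cases hg : g[k]? with
  | none => rw [hg] at hk; simp at hk
  | some a =>
    have ha : a ∈ g := List.mem_iff_getElem?.2 ⟨k, hg⟩
    rw [hg] at hk
    simp at hk
    by_cases hyk : y = k
    · rw [if_pos hyk] at hk
      rw [← hk]
      simpa using h a ha
    · rw [if_neg hyk] at hk
      exact hk ▸ h a ha

theorem get2_setCell_ne (g : List (List String)) (y x : Nat) (v : String) (i j : Nat)
    (h : ¬(i = y ∧ j = x)) : pvGet2 (setCell g y x v) i j = pvGet2 g i j := by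
  unfold pvGet2 setCell
  by_cases hy : i = y
  · subst hy
    have hx : j ≠ x := fun e => h ⟨rfl, e⟩
    have hxj : ¬ x = j := fun e => hx (Eq.symm e)
    simp only [List.getD, List.getElem?_modify]
    cases hg : g[i]? with
    | none => simp
    | some r => simp [hxj]
  · have hyi : ¬ y = i := fun e => hy (Eq.symm e)
    simp only [List.getD, List.getElem?_modify]
    cases g[i]? <;> simp [hyi]

theorem get2_setCell_self (g : List (List String)) (y x : Nat) (v : String)
    (hy : y < g.length) (hx : x < (g.getD y []).length) :
    pvGet2 (setCell g y x v) y x = v := by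
  unfold pvGet2 setCell
  have hg : g[y]? = some (g.getD y []) := by
    rw [List.getD_eq_getElem _ _ hy]; exact List.getElem?_eq_getElem hy
  have h1 : (g.modify y (fun row => row.set x v))[y]? = some ((g.getD y []).set x v) := by
    rw [List.getElem?_modify, hg]; simp
  simp only [List.getD, h1, Option.getD_some]
  rw [List.getElem?_set]
  have hx' : x < (g[y]?.getD []).length := by
    rw [hg]; simpa [List.getD] using hx
  simp [hx']

-- the scatter step of B
def pvStep (ncols nrows : Int) (g : List (List String)) (p : Int × Int) : List (List String) :=
  if 0 ≤ p.1 ∧ p.1 < ncols ∧ 0 ≤ p.2 ∧ p.2 < nrows then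
    setCell g p.2.toNat p.1.toNat "#"
  else g

theorem shape_step (ncols nrows : Int) (g : List (List String)) (p : Int × Int) (C : Nat)
    (h : ∀ r ∈ g, r.length = C) :
    (pvStep ncols nrows g p).length = g.length ∧ ∀ r ∈ pvStep ncols nrows g p, r.length = C := by
  unfold pvStep
  split
  · exact ⟨length_setCell .., rowlen_setCell _ _ _ _ _ h⟩
  · exact ⟨rfl, h⟩

theorem shape_fold (ncols nrows : Int) (ls : List (Int × Int)) (g : List (List String)) (C : Nat)
    (h : ∀ r ∈ g, r.length = C) :
    (ls.foldl (pvStep ncols nrows) g).length = g.length ∧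
      ∀ r ∈ ls.foldl (pvStep ncols nrows) g, r.length = C := by
  induction ls generalizing g with
  | nil => exact ⟨rfl, h⟩
  | cons p t ih =>
    obtain ⟨h1, h2⟩ := shape_step ncols nrows g p C h
    obtain ⟨ih1, ih2⟩ := ih _ h2
    exact ⟨ih1.trans h1, ih2⟩

theorem mark_get2 (ncols nrows : Int) (ls : List (Int × Int)) (g : List (List String))
    (hlen : g.length = nrows.toNat) (hrows : ∀ r ∈ g, r.length = ncols.toNat)
    (i j : Nat) (hi : i < nrows.toNat) (hj : j < ncols.toNat) :
    pvGet2 (ls.foldl (pvStep ncols nrows) g) i j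
      = if ((j : Int), (i : Int)) ∈ ls then "#" else pvGet2 g i j := by
  have hN : 0 < nrows := by omega
  have hC : 0 < ncols := by omega
  have hjI : (j : Int) < ncols := by omega
  have hiI : (i : Int) < nrows := by omega
  induction ls generalizing g with
  | nil => simp
  | cons p t ih =>
    by_cases hp : 0 ≤ p.1 ∧ p.1 < ncols ∧ 0 ≤ p.2 ∧ p.2 < nrows
    · have hstep : pvStep ncols nrows g p = setCell g p.2.toNat p.1.toNat "#" := by
        simp [pvStep, hp]
      have hrows' := rowlen_setCell g p.2.toNat p.1.toNat "#" _ hrows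
      have hlen' : (setCell g p.2.toNat p.1.toNat "#").length = nrows.toNat := by
        rw [length_setCell]; exact hlen
      rw [List.foldl_cons, hstep, ih _ hlen' hrows']
      by_cases hpe : p = ((j : Int), (i : Int))
      · have hji : p.2.toNat = i ∧ p.1.toNat = j := by subst hpe; simp
        have hself : pvGet2 (setCell g p.2.toNat p.1.toNat "#") i j = "#" := by
          rw [← hji.1, ← hji.2]
          refine get2_setCell_self g _ _ _ (by omega) ?_
          have hm : g.getD p.2.toNat [] ∈ g := by
            rw [List.getD_eq_getElem _ _ (by omega : p.2.toNat < g.length)]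
            exact List.getElem_mem _
          rw [hrows _ hm]; omega
        have hmem : ((j : Int), (i : Int)) ∈ p :: t := by
          rw [hpe]; exact List.mem_cons_self
        rw [if_pos hmem]
        by_cases hmt : ((j : Int), (i : Int)) ∈ t
        · rw [if_pos hmt]
        · rw [if_neg hmt]; exact hself
      · have hne : ¬(i = p.2.toNat ∧ j = p.1.toNat) := by
          rintro ⟨e1, e2⟩
          apply hpe
          have : p.1 = (j : Int) := by omega
          have : p.2 = (i : Int) := by omega
          ext <;> omega
        rw [get2_setCell_ne g _ _ _ _ _ hne]
        have hpe2 : ((j : Int), (i : Int)) ≠ p := fun e => hpe e.symm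
        have hmm : (((j : Int), (i : Int)) ∈ p :: t) ↔ (((j : Int), (i : Int)) ∈ t) := by
          simp [List.mem_cons, hpe2]
        simp only [hmm]
    · have hstep : pvStep ncols nrows g p = g := by simp [pvStep, hp]
      rw [List.foldl_cons, hstep, ih _ hlen hrows]
      have hpe : p ≠ ((j : Int), (i : Int)) := by
        rintro rfl
        exact hp ⟨by omega, hjI, by omega, hiI⟩
      have hpe2 : ((j : Int), (i : Int)) ≠ p := fun e => hpe e.symm
      have : (((j : Int), (i : Int)) ∈ p :: t) ↔ (((j : Int), (i : Int)) ∈ t) := by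
        simp [List.mem_cons, hpe2]
      simp only [this]

theorem populate_spec_aux (lines : List (Int × Int)) : populate lines = populate_alt lines := by
  unfold populate populate_alt
  dsimp only
  set mx := (PySem.List.max? (lines.map (fun p => p.1)) (fun v => v)).getD 0 with hmx
  set my := (PySem.List.max? (lines.map (fun p => p.2)) (fun v => v)).getD 0 with hmy
  set nrows := my + 1
  set ncols := 2 * mx + 1
  set R := nrows.toNat
  set C := ncols.toNat
  set base := List.replicate R (List.replicate C ".") with hbase
  have hbase_rows : ∀ r ∈ base, r.length = C := by
    intro r hr; rw [List.eq_of_mem_replicate hr]; simp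
  have hbase_len : base.length = R := by simp [hbase]
  set G := lines.foldl (pvStep ncols nrows) base with hG
  obtain ⟨hGlen, hGrows⟩ := shape_fold ncols nrows lines base C hbase_rows
  rw [← hG] at hGlen hGrows
  rw [hbase_len] at hGlen
  -- B's foldl is literally foldl of pvStep
  have hBfold : lines.foldl (fun g p =>
      if 0 ≤ p.1 ∧ p.1 < ncols ∧ 0 ≤ p.2 ∧ p.2 < nrows then
        setCell g p.2.toNat p.1.toNat "#" else g) base = G := by
    rw [hG]; rfl
  rw [hBfold]
  -- name B's result
  set B : List (List String) := if 0 < nrows ∧ (500 : Int) < ncols then setCell G 0 500 "+" else G with hB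
  -- shape of B
  have hBlen : B.length = R := by
    rw [hB]; split
    · rw [length_setCell]; exact hGlen
    · exact hGlen
  have hBrows : ∀ r ∈ B, r.length = C := by
    rw [hB]; split
    · exact rowlen_setCell _ _ _ _ _ hGrows
    · exact hGrows
  -- A side as range-map
  rw [PySem.List.pyRange_one, PySem.List.pyRange_one]
  simp only [sub_zero, zero_add]
  -- pointwise equality
  apply List.ext_getElem
  · simpa using hBlen.symm
  intro i h1 h2
  simp only [List.getElem_map, List.getElem_range]
  have hi : i < R := by simpa using hBlen ▸ h2
  -- rows as lists
  have hBrow_mem : B[i] ∈ B := List.getElem_mem h2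
  have hBrow_len : B[i].length = C := hBrows _ hBrow_mem
  apply List.ext_getElem
  · simpa using hBrow_len.symm
  intro j h3 h4
  simp only [List.getElem_map, List.getElem_range]
  have hj : j < C := by simpa using hBrow_len ▸ h4
  -- B's cell via pvGet2
  have hBcell : B[i][j] = pvGet2 B i j := by
    unfold pvGet2
    rw [List.getD_eq_getElem _ _ (by omega : i < B.length),
        List.getD_eq_getElem _ _ (by omega : j < B[i].length)]
  have hRpos : 0 < nrows := by omega
  have hCposI : (0:Int) < ncols := by omega
  have hGcell : pvGet2 G i j = if ((j : Int), (i : Int)) ∈ lines then "#" else "." := by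
    rw [mark_get2 ncols nrows lines base hbase_len hbase_rows i j hi hj]
    have : pvGet2 base i j = "." := by
      rw [hbase]
      simp [pvGet2, List.getD, hi, hj]
    rw [this]
  rw [hBcell]
  by_cases hplus : i = 0 ∧ j = 500
  · -- the '+' cell exists: guard of B holds
    have hguard : 0 < nrows ∧ (500 : Int) < ncols := ⟨hRpos, by omega⟩
    have : B = setCell G 0 500 "+" := by rw [hB, if_pos hguard]
    rw [this, hplus.1, hplus.2]
    rw [get2_setCell_self G 0 500 "+" (by omega) ?_]
    · simp
    · have hm : G.getD 0 [] ∈ G := by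
        rw [List.getD_eq_getElem _ _ (by omega : 0 < G.length)]
        exact List.getElem_mem _
      rw [hGrows _ hm]; omega
  · -- not the '+' cell
    have hBG : pvGet2 B i j = pvGet2 G i j := by
      rw [hB]; split
      · exact get2_setCell_ne G 0 500 "+" i j hplus
      · rfl
    rw [hBG, hGcell]
    have hAplus : ¬((i : Int) = 0 ∧ (j : Int) = 500) := by
      rintro ⟨e1, e2⟩; exact hplus ⟨by omega, by omega⟩
    rw [if_neg hAplus]

-- ===== VERDICT (by name: the statement is the Claim_ definition above) =====
theorem populate_spec : Claim_equal_populate := by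
  intro lines _ _
  unfold Spec_populate
  exact populate_spec_aux lines
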